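-- pv_equiv track=rewrite | github.com/amol-ship-it/agi-core | domains/arc/transformation_primitives.py | rotate_tile_cw
-- ===== SOURCE A (Python) =====
-- Grid = list[list[int]]
--
-- def rotate_tile_cw(grid: Grid) -> Grid:
--     """2x2 rotation tile: orig|rot90 / rot270|rot180. Square grids only.
--
--     Justified by tasks 46442a0e, 7fe24cdd.
--     """
--     if not grid or not grid[0]:
--         return grid
--     h, w = len(grid), len(grid[0])
--     if h != w:
--         return grid
--     r90 = [[grid[h - 1 - c][r] for c in range(h)] for r in range(w)]
--     r180 = [[grid[h - 1 - r][w - 1 - c] for c in range(w)] for r in range(h)]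
--     r270 = [[grid[c][w - 1 - r] for c in range(h)] for r in range(w)]
--     top = [grid[r] + r90[r] for r in range(h)]
--     bottom = [r270[r] + r180[r] for r in range(h)]
--     return top + bottom
-- ===== SOURCE B (Python) =====
-- def rotate_tile_cw(grid):
--     """2x2 rotation tile built by composing one clockwise rotation three times."""
--     if not grid or not grid[0] or len(grid) != len(grid[0]):
--         return grid
--     def rot90(g):
--         return [list(row) for row in zip(*g[::-1])]
--     r90 = rot90(grid)
--     r180 = rot90(r90)
--     r270 = rot90(r180)
--     top = [a + b for a, b in zip(grid, r90)]
--     bottom = [a + b for a, b in zip(r270, r180)]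
--     return top + bottom
-- ===== Notes on version B (the rewrite author's own statement) =====
-- stated objective: simpler
-- what changed: B defines one clockwise rotation (zip-transpose of the reversed grid) and obtains the 180 and 270 rotations by composing it, then zips the row lists together, instead of A's three independent index-formula comprehensions.
import Mathlib
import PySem

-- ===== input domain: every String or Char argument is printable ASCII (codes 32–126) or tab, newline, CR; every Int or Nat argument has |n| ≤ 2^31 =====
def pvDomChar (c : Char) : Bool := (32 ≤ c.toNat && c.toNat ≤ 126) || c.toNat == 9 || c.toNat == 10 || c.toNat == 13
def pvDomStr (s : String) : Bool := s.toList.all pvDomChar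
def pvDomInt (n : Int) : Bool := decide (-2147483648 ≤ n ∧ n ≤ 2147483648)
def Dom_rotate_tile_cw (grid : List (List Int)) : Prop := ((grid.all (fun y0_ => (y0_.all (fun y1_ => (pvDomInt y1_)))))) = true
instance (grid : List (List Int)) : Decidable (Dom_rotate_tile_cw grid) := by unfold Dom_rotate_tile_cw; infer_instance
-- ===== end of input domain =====

-- B builds the tile by composing one clockwise rotation (zip-transpose of the reversed grid)
-- three times instead of A's three independent index formulas; objective: simpler decomposition.

-- ===== PORT A =====
def rotate_tile_cw (grid : List (List Int)) : List (List Int) :=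
  if grid = [] ∨ PySem.List.pyGetD grid 0 [] = [] then grid
  else
    let h : Int := grid.length
    let w : Int := (PySem.List.pyGetD grid 0 []).length
    if h ≠ w then grid
    else
      let r90 := (PySem.List.pyRange 0 w 1).map (fun r =>
        (PySem.List.pyRange 0 h 1).map (fun c =>
          PySem.List.pyGetD (PySem.List.pyGetD grid (h - 1 - c) []) r 0))
      let r180 := (PySem.List.pyRange 0 h 1).map (fun r =>
        (PySem.List.pyRange 0 w 1).map (fun c =>
          PySem.List.pyGetD (PySem.List.pyGetD grid (h - 1 - r) []) (w - 1 - c) 0))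
      let r270 := (PySem.List.pyRange 0 w 1).map (fun r =>
        (PySem.List.pyRange 0 h 1).map (fun c =>
          PySem.List.pyGetD (PySem.List.pyGetD grid c []) (w - 1 - r) 0))
      let top := (PySem.List.pyRange 0 h 1).map (fun r =>
        PySem.List.pyGetD grid r [] ++ PySem.List.pyGetD r90 r [])
      let bottom := (PySem.List.pyRange 0 h 1).map (fun r =>
        PySem.List.pyGetD r270 r [] ++ PySem.List.pyGetD r180 r [])
      top ++ bottom

-- ===== PORT B =====
-- hand port of Python's variadic zip(*rows) (exact: stops at the shortest row);
-- the fuel only makes the recursion structural: it is one more than the first row's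
-- length, which bounds the number of produced columns.
def pvZipStarAux : Nat → List (List Int) → List (List Int)
  | 0, _ => []
  | fuel + 1, rows =>
    if rows.isEmpty || rows.any (fun r => r.isEmpty) then []
    else (rows.map (fun r => r.headD 0)) :: pvZipStarAux fuel (rows.map (fun r => r.tail))

def pvZipStar (rows : List (List Int)) : List (List Int) :=
  pvZipStarAux ((rows.headD []).length + 1) rows

-- rot90(g) = [list(row) for row in zip(*g[::-1])]
def pvRot90 (g : List (List Int)) : List (List Int) := pvZipStar g.reverse

def rotate_tile_cw_alt (grid : List (List Int)) : List (List Int) :=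
  if grid = [] ∨ grid.headD [] = [] ∨ grid.length ≠ (grid.headD []).length then grid
  else
    let r90 := pvRot90 grid
    let r180 := pvRot90 r90
    let r270 := pvRot90 r180
    let top := (grid.zip r90).map (fun p => p.1 ++ p.2)
    let bottom := (r270.zip r180).map (fun p => p.1 ++ p.2)
    top ++ bottom

-- ===== PRECONDITION & SPEC =====
-- Pre_ excludes exactly the inputs where A raises IndexError: a square-looking grid
-- (first-row width = height) with some row shorter than the height.
def Pre_rotate_tile_cw (grid : List (List Int)) : Prop :=
  (grid ≠ [] ∧ grid.headD [] ≠ [] ∧ grid.length = (grid.headD []).length) →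
    ∀ row ∈ grid, grid.length ≤ row.length
instance (grid : List (List Int)) : Decidable (Pre_rotate_tile_cw grid) := by
  unfold Pre_rotate_tile_cw; infer_instance
def pvWitness_rotate_tile_cw : List (List Int) := [[1, 2], [3, 4]]

def Spec_rotate_tile_cw (grid : List (List Int)) (out : List (List Int)) : Prop := out = rotate_tile_cw_alt grid
instance (grid : List (List Int)) (out : List (List Int)) : Decidable (Spec_rotate_tile_cw grid out) := by unfold Spec_rotate_tile_cw; infer_instance

-- ===== CLAIM (what is proved, stated in full; the proofs are below) =====
def Claim_equal_rotate_tile_cw : Prop := ∀ (grid : List (List Int)), Dom_rotate_tile_cw grid → Pre_rotate_tile_cw grid → Spec_rotate_tile_cw grid (rotate_tile_cw grid)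


-- ===== LEMMAS AND PROOFS =====

-- the cell grid[i][j] (both programs only read cells in range) and the n×n index normal form
def pvCell (g : List (List Int)) (i j : Nat) : Int := (g.getD i []).getD j 0
def pvN (n : Nat) (f : Nat → Nat → Int) : List (List Int) :=
  (List.range n).map (fun r => (List.range n).map (fun c => f r c))

theorem pvZipStarAux_eq (m : Nat) : ∀ (fuel : Nat) (rows : List (List Int)),
    (rows.headD []).length < fuel → rows ≠ [] →
    (∃ row ∈ rows, row.length = m) → (∀ row ∈ rows, m ≤ row.length) →
    pvZipStarAux fuel rows = (List.range m).map (fun r => rows.map (fun row => row.getD r 0)) := by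
  induction m with
  | zero =>
    intro fuel rows hf hne ⟨w, hw, hwl⟩ _
    have hwnil : w = [] := List.eq_nil_of_length_eq_zero hwl
    cases fuel with
    | zero => omega
    | succ f =>
      have : rows.any (fun r => r.isEmpty) = true := by
        simp only [List.any_eq_true]
        exact ⟨w, hw, by simp [hwnil]⟩
      simp [pvZipStarAux, this]
  | succ m ih =>
    intro fuel rows hf hne ⟨w, hw, hwl⟩ hall
    have hnonempty : ∀ row ∈ rows, row ≠ [] := by
      intro row hr hnil
      have := hall row hr; simp [hnil] at this
    cases fuel with
    | zero => omega
    | succ f =>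
      have hcond : (rows.isEmpty || rows.any (fun r => r.isEmpty)) = false := by
        simp only [Bool.or_eq_false_iff, List.any_eq_false, List.isEmpty_eq_false_iff]
        exact ⟨hne, fun r hr => by simp [hnonempty r hr]⟩
      rw [pvZipStarAux, hcond]
      simp only [Bool.false_eq_true, if_false]
      have hf' : (((rows.map (fun r => r.tail)).headD []).length) < f := by
        obtain ⟨r0, rs, hrr⟩ := List.exists_cons_of_ne_nil hne
        have h1 : 1 ≤ r0.length := by
          have := hall r0 (by rw [hrr]; exact List.mem_cons_self); omega
        have := hf
        rw [hrr] at this ⊢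
        simp only [List.map_cons, List.headD_cons, List.length_tail] at *
        omega
      rw [ih f _ hf' (by simp [hne])
        ⟨w.tail, List.mem_map.2 ⟨w, hw, rfl⟩, by simp [List.length_tail, hwl]⟩
        (by
          intro row' hrow'
          obtain ⟨row, hrow, rfl⟩ := List.mem_map.1 hrow'
          have := hall row hrow
          simp only [List.length_tail]
          omega)]
      rw [List.range_succ_eq_map, List.map_cons, List.map_map]
      congr 1
      · exact List.map_congr_left (fun row hr => by
          cases row with
          | nil => exact absurd rfl (hnonempty _ hr)
          | cons a t => simp)
      · refine List.map_congr_left (fun k _ => ?_)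
        simp only [Function.comp_apply]
        rw [List.map_map]
        exact List.map_congr_left (fun row hr => by
          cases row with
          | nil => exact absurd rfl (hnonempty _ hr)
          | cons a t => simp [Nat.succ_eq_add_one])

theorem pvZipStar_eq (rows : List (List Int)) (m : Nat) (hne : rows ≠ [])
    (hw : ∃ row ∈ rows, row.length = m) (hall : ∀ row ∈ rows, m ≤ row.length) :
    pvZipStar rows = (List.range m).map (fun r => rows.map (fun row => row.getD r 0)) :=
  pvZipStarAux_eq m _ rows (Nat.lt_succ_self _) hne hw hall

theorem pvRot90_char (g : List (List Int)) (n : Nat) (hn : 0 < n) (hlen : g.length = n)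
    (h0 : (g.headD []).length = n) (hrows : ∀ row ∈ g, n ≤ row.length) :
    pvRot90 g = pvN n (fun r c => pvCell g (n - 1 - c) r) := by
  obtain ⟨r0, rs, rfl⟩ := List.exists_cons_of_ne_nil
    (by intro h; subst h; simp at hlen; omega : (g ≠ []))
  simp only [List.headD_cons] at h0
  rw [pvRot90, pvZipStar_eq _ n (by simp)
    ⟨r0, by simp, h0⟩ (fun row hr => hrows row (List.mem_reverse.1 hr))]
  unfold pvN
  refine List.map_congr_left (fun r hr => ?_)
  apply List.ext_getElem
  · simp only [List.length_map, List.length_reverse, List.length_range]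
    exact hlen
  · intro c hc1 hc2
    simp only [List.length_map, List.length_reverse] at hc1
    have hcn : c < n := by omega
    rw [List.getElem_map, List.getElem_map, List.getElem_range, List.getElem_reverse,
      ← List.getD_eq_getElem (r0 :: rs) []
        (by omega : (r0 :: rs).length - 1 - c < (r0 :: rs).length),
      show (r0 :: rs).length - 1 - c = n - 1 - c from by omega]
    simp [pvCell]

theorem pvN_length (n : Nat) (f : Nat → Nat → Int) : (pvN n f).length = n := by
  simp [pvN]

theorem pvN_row (n : Nat) (f : Nat → Nat → Int) (row : List Int) (h : row ∈ pvN n f) :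
    row.length = n := by
  obtain ⟨r, _, rfl⟩ := List.mem_map.1 h
  simp

theorem pvN_headD (n : Nat) (hn : 0 < n) (f : Nat → Nat → Int) :
    ((pvN n f).headD []).length = n := by
  obtain ⟨k, rfl⟩ := Nat.exists_eq_add_of_lt hn
  rw [pvN, Nat.zero_add, List.range_succ_eq_map, List.map_cons, List.headD_cons]
  simp

theorem pvCell_N (n : Nat) (f : Nat → Nat → Int) (r c : Nat) (hr : r < n) (hc : c < n) :
    pvCell (pvN n f) r c = f r c := by
  have h1 : (pvN n f).getD r [] = (List.range n).map (fun c => f r c) := by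
    unfold pvN
    rw [List.getD_eq_getElem _ _ (by simp [hr]), List.getElem_map, List.getElem_range]
  unfold pvCell
  rw [h1, List.getD_eq_getElem _ _ (by simp [hc]), List.getElem_map, List.getElem_range]

theorem pvN_congr (n : Nat) (f g : Nat → Nat → Int)
    (h : ∀ r c, r < n → c < n → f r c = g r c) : pvN n f = pvN n g := by
  unfold pvN
  exact List.map_congr_left (fun r hr =>
    List.map_congr_left (fun c hc =>
      h r c (List.mem_range.1 hr) (List.mem_range.1 hc)))

theorem pvRot90_N (n : Nat) (hn : 0 < n) (f : Nat → Nat → Int) :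
    pvRot90 (pvN n f) = pvN n (fun r c => f (n - 1 - c) r) := by
  rw [pvRot90_char (pvN n f) n hn (pvN_length n f) (pvN_headD n hn f)
    (fun row hr => le_of_eq (pvN_row n f row hr).symm)]
  exact pvN_congr n _ _ (fun r c hr hc => pvCell_N n f (n - 1 - c) r (by omega) hr)

theorem pvZipAppend (xs ys : List (List Int)) (n : Nat) (hx : xs.length = n) (hy : ys.length = n) :
    (xs.zip ys).map (fun p => p.1 ++ p.2) =
      (List.range n).map (fun r => xs.getD r [] ++ ys.getD r []) := by
  apply List.ext_getElem
  · simp [hx, hy]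
  · intro r h1 h2
    simp only [List.length_map, List.length_zip, hx, hy, Nat.min_self] at h1
    rw [List.getElem_map, List.getElem_map, List.getElem_range, List.getElem_zip,
      List.getD_eq_getElem _ _ (by omega), List.getD_eq_getElem _ _ (by omega)]

-- convert A's pyRange/pyGetD comprehension to the Nat-indexed normal form
theorem pyMapRange {α : Type} (n : Nat) (f : Int → α) :
    (PySem.List.pyRange 0 (n : Int) 1).map f = (List.range n).map (fun k : Nat => f (k : Int)) := by
  rw [show (PySem.List.pyRange 0 (n : Int) 1) = PySem.List.pyRange 0 (n : Int) from rfl,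
    PySem.List.pyRange_zero_nat, List.map_map]
  rfl

-- the agreeing main branch: a nonempty square-looking grid with all rows long enough
theorem pvMain (r0 : List Int) (rs : List (List Int)) (n : Nat) (hn : 0 < n)
    (hlen : (r0 :: rs).length = n) (h0 : r0.length = n)
    (hrows : ∀ row ∈ (r0 :: rs), n ≤ row.length) :
    rotate_tile_cw (r0 :: rs) = rotate_tile_cw_alt (r0 :: rs) := by
  have hA1 : ¬((r0 :: rs) = [] ∨ PySem.List.pyGetD (r0 :: rs) 0 [] = []) := by
    rw [PySem.List.pyGetD_zero_cons]
    rintro (h | h)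
    · exact List.cons_ne_nil _ _ h
    · rw [h] at h0; simp at h0; omega
  have hB1 : ¬((r0 :: rs) = [] ∨ (r0 :: rs).headD [] = [] ∨
      (r0 :: rs).length ≠ ((r0 :: rs).headD []).length) := by
    simp only [List.headD_cons]
    rintro (h | h | h)
    · exact List.cons_ne_nil _ _ h
    · rw [h] at h0; simp at h0; omega
    · exact h (hlen.trans h0.symm)
  rw [rotate_tile_cw, rotate_tile_cw_alt, if_neg hA1, if_neg hB1]
  simp only [PySem.List.pyGetD_zero_cons]
  rw [if_neg (show ¬(((r0 :: rs).length : Int) ≠ (r0.length : Int)) from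
    fun hh => hh (by exact_mod_cast hlen.trans h0.symm))]
  rw [show (r0 :: rs).length = n from hlen, h0]
  -- B side rotations
  have e90 : pvRot90 (r0 :: rs) = pvN n (fun r c => pvCell (r0 :: rs) (n - 1 - c) r) :=
    pvRot90_char _ n hn hlen (by simpa using h0) hrows
  rw [e90, pvRot90_N n hn, pvRot90_N n hn]
  rw [pvZipAppend (r0 :: rs) _ n hlen (pvN_length n _),
    pvZipAppend _ _ n (pvN_length n _) (pvN_length n _)]
  -- A side comprehensions to normal form
  simp only [pyMapRange, PySem.List.pyGetD_natCast]
  have hA90 : (List.map (fun k : Nat => List.map (fun k1 : Nat =>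
        (PySem.List.pyGetD (r0 :: rs) ((n : Int) - 1 - (k1 : Int)) []).getD k 0)
        (List.range n)) (List.range n))
      = pvN n (fun r c => pvCell (r0 :: rs) (n - 1 - c) r) := by
    unfold pvN
    refine List.map_congr_left (fun r hr => List.map_congr_left (fun c hc => ?_))
    rw [List.mem_range] at hr hc
    rw [show ((n : Int) - 1 - (c : Int)) = ((n - 1 - c : Nat) : Int) from by omega,
      PySem.List.pyGetD_natCast]
    rfl
  have hA180 : (List.map (fun k : Nat => List.map (fun k1 : Nat =>
        PySem.List.pyGetD (PySem.List.pyGetD (r0 :: rs) ((n : Int) - 1 - (k : Int)) [])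
          ((n : Int) - 1 - (k1 : Int)) 0) (List.range n)) (List.range n))
      = pvN n (fun r c => pvCell (r0 :: rs) (n - 1 - r) (n - 1 - c)) := by
    unfold pvN
    refine List.map_congr_left (fun r hr => List.map_congr_left (fun c hc => ?_))
    rw [List.mem_range] at hr hc
    rw [show ((n : Int) - 1 - (r : Int)) = ((n - 1 - r : Nat) : Int) from by omega,
      show ((n : Int) - 1 - (c : Int)) = ((n - 1 - c : Nat) : Int) from by omega,
      PySem.List.pyGetD_natCast, PySem.List.pyGetD_natCast]
    rfl
  have hA270 : (List.map (fun k : Nat => List.map (fun k1 : Nat =>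
        PySem.List.pyGetD ((r0 :: rs).getD k1 []) ((n : Int) - 1 - (k : Int)) 0)
        (List.range n)) (List.range n))
      = pvN n (fun r c => pvCell (r0 :: rs) c (n - 1 - r)) := by
    unfold pvN
    refine List.map_congr_left (fun r hr => List.map_congr_left (fun c hc => ?_))
    rw [List.mem_range] at hr hc
    rw [show ((n : Int) - 1 - (r : Int)) = ((n - 1 - r : Nat) : Int) from by omega,
      PySem.List.pyGetD_natCast]
    rfl
  rw [hA90, hA180, hA270,
    show pvN n (fun r c => pvCell (r0 :: rs) (n - 1 - (n - 1 - c)) (n - 1 - r))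
        = pvN n (fun r c => pvCell (r0 :: rs) c (n - 1 - r)) from
      pvN_congr n _ _ (fun r c hr hc => by rw [show n - 1 - (n - 1 - c) = c from by omega])]

-- ===== VERDICT (by name: the statement is the Claim_ definition above) =====
theorem rotate_tile_cw_spec : Claim_equal_rotate_tile_cw := by
  intro grid _ hpre
  unfold Spec_rotate_tile_cw
  cases grid with
  | nil => rfl
  | cons r0 rs =>
    by_cases h0 : r0 = []
    · subst h0
      rw [rotate_tile_cw, rotate_tile_cw_alt,
        if_pos (Or.inr (by rw [PySem.List.pyGetD_zero_cons])),
        if_pos (Or.inr (Or.inl (by rw [List.headD_cons])))]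
    · by_cases hsq : (r0 :: rs).length = r0.length
      · exact pvMain r0 rs r0.length
          (by cases r0 with | nil => exact absurd rfl h0 | cons a t => simp)
          hsq rfl
          (fun row hr => hsq ▸ hpre ⟨by simp, by simpa using h0, by simpa using hsq⟩ row hr)
      · have hA1 : ¬((r0 :: rs) = [] ∨ PySem.List.pyGetD (r0 :: rs) 0 [] = []) := by
          rw [PySem.List.pyGetD_zero_cons]
          rintro (h | h)
          · exact List.cons_ne_nil _ _ h
          · exact h0 h
        rw [rotate_tile_cw, rotate_tile_cw_alt, if_neg hA1,
          if_pos (Or.inr (Or.inr (by simp only [List.headD_cons]; exact hsq)))]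
        simp only [PySem.List.pyGetD_zero_cons]
        rw [if_pos (show ((r0 :: rs).length : Int) ≠ (r0.length : Int) from by
          exact_mod_cast hsq)]
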